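-- pv_equiv track=rewrite | github.com/jcruzfernandez/codificacion_poligonos_ArcMap | ControlPredios/scripts/codificacionPrediosTotal.py | indexacion
-- ===== SOURCE A (Python) =====
-- def indexacion(tuplas):
--     # Diccionario para rastrear las coordenadas y asignar índices
--     coord_dict = {}
--     index = 1
--     # Lista para almacenar el resultado final
--     resultado = []
--
--     for tupla in tuplas:
--         coord = tupla[1]
--         if coord in coord_dict:
--             idx = coord_dict[coord]
--         else:
--             idx = index
--             coord_dict[coord] = idx
--             index += 1
--         resultado.append((idx, tupla))
--     return resultado
-- ===== SOURCE B (Python) =====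
-- def indexacion(tuplas):
--     # Dict-free: the index of a coordinate is 1 + the number of distinct
--     # coordinates appearing strictly before its first occurrence.
--     coords = [t[1] for t in tuplas]
--     resultado = []
--     for t in tuplas:
--         first = coords.index(t[1])
--         resultado.append((len(set(coords[:first])) + 1, t))
--     return resultado
-- ===== Notes on version B (the rewrite author's own statement) =====
-- stated objective: alternative
-- what changed: Replaces A's single pass with a dict and a running counter by a dict-free counting algorithm: a coordinate's index is recomputed per tuple as 1 + the number of distinct coordinates before its first occurrence, via list.index and len(set(prefix)) nested scans.
import Mathlib
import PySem

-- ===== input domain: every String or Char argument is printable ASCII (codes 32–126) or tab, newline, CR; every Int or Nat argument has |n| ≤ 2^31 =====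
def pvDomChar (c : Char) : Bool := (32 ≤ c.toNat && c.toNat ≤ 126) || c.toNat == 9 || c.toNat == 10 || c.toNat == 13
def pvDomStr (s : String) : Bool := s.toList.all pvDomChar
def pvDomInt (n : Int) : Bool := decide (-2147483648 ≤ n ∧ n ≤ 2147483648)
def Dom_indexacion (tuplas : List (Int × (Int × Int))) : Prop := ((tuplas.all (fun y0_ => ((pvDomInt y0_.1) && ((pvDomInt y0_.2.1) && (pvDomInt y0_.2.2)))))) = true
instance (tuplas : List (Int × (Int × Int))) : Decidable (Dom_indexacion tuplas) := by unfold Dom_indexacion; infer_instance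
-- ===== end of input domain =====

-- ===== PORT A =====
-- B replaces A's dict-with-running-counter pass by a dict-free counting algorithm
-- (index = 1 + number of distinct coordinates before the first occurrence); alternative, not faster.
def indexacion (tuplas : List (Int × (Int × Int))) : List (Int × (Int × (Int × Int))) :=
  -- coord_dict = {}; index = 1; resultado = []; for tupla in tuplas: ...
  let s := tuplas.foldl
    (fun (s : PySem.Dict (Int × Int) Int × Int × List (Int × (Int × (Int × Int)))) tupla =>
      let coord := tupla.2
      if s.1.contains coord then
        -- idx = coord_dict[coord]  (coord is present, so indexing never raises; .getD 0 is the total form)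
        (s.1, s.2.1, s.2.2 ++ [((s.1.get? coord).getD 0, tupla)])
      else
        -- idx = index; coord_dict[coord] = idx; index += 1
        (s.1.insert coord s.2.1, s.2.1 + 1, s.2.2 ++ [(s.2.1, tupla)]))
    (PySem.Dict.empty, 1, [])
  s.2.2

-- ===== PORT B =====
def indexacion_alt (tuplas : List (Int × (Int × Int))) : List (Int × (Int × (Int × Int))) :=
  -- coords = [t[1] for t in tuplas]
  let coords := tuplas.map (fun t => t.2)
  -- for t in tuplas: first = coords.index(t[1]); resultado.append((len(set(coords[:first])) + 1, t))
  -- (t[1] is always in coords, so .index never raises; .getD 0 is the total form)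
  tuplas.map (fun t =>
    let first : Nat := (PySem.List.index? coords t.2).getD 0
    (((PySem.Set.ofList (PySem.List.slice coords none (some (first : Int)))).length : Int) + 1, t))

-- ===== PRECONDITION & SPEC =====
def Spec_indexacion (tuplas : List (Int × (Int × Int))) (out : List (Int × (Int × (Int × Int)))) : Prop := out = indexacion_alt tuplas
instance (tuplas : List (Int × (Int × Int))) (out : List (Int × (Int × (Int × Int)))) : Decidable (Spec_indexacion tuplas out) := by unfold Spec_indexacion; infer_instance

-- ===== CLAIM (what is proved, stated in full; the proofs are below) =====
def Claim_equal_indexacion : Prop := ∀ (tuplas : List (Int × (Int × Int))), Dom_indexacion tuplas → Spec_indexacion tuplas (indexacion tuplas)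

-- ===== LEMMAS AND PROOFS =====

theorem idxOf?_append_singleton (l : List (Int × Int)) (x c : Int × Int) :
    (l ++ [x]).idxOf? c =
      if c ∈ l then l.idxOf? c else if c = x then some l.length else none := by
  induction l with
  | nil => simp [List.idxOf?_cons]; split <;> simp_all [eq_comm]
  | cons a l ih =>
    by_cases hac : c = a
    · simp [List.idxOf?_cons, hac]
    · have hac' : ¬ a = c := fun h => hac h.symm
      simp [List.idxOf?_cons, hac', ih]
      by_cases hm : c ∈ l <;> simp [hm, hac]

theorem idxOf?_append_left (l u : List (Int × Int)) (c : Int × Int) (h : c ∈ l) :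
    (l ++ u).idxOf? c = l.idxOf? c := by
  induction l with
  | nil => simp at h
  | cons a l ih =>
    by_cases hac : a = c
    · simp [List.idxOf?_cons, hac]
    · have : c ∈ l := by cases h with | head => exact absurd rfl hac | tail _ h => exact h
      simp [List.idxOf?_cons, hac, ih this]

theorem foldl_add_isPrefix (q : List (Int × Int)) : ∀ (s : List (Int × Int)),
    s <+: q.foldl PySem.Set.add s := by
  induction q with
  | nil => intro s; simp
  | cons x xs ih =>
    intro s
    have h1 : s <+: PySem.Set.add s x := by
      simp [PySem.Set.add]; split
      · exact List.prefix_refl _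
      · exact ⟨[x], rfl⟩
    exact h1.trans (ih _)

def seenAfter (seen : List (Int × Int)) (rest : List (Int × (Int × Int))) : List (Int × Int) :=
  rest.foldl (fun acc t => PySem.Set.add acc t.2) seen

theorem seenAfter_isPrefix (rest : List (Int × (Int × Int))) : ∀ (seen : List (Int × Int)),
    seen <+: seenAfter seen rest := by
  induction rest with
  | nil => intro seen; simp [seenAfter]
  | cons t ts ih =>
    intro seen
    have h1 : seen <+: PySem.Set.add seen t.2 := by
      simp [PySem.Set.add]; split
      · exact List.prefix_refl _
      · exact ⟨[t.2], rfl⟩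
    exact h1.trans (ih _)

theorem dict_contains_eq_isSome_get? {κ ν : Type} [BEq κ] (d : PySem.Dict κ ν) (k : κ) :
    d.contains k = (d.get? k).isSome := by
  simp [PySem.Dict.contains, PySem.Dict.get?]
  induction d.items with
  | nil => simp
  | cons p ps ih => by_cases h : p.1 == k <;> simp [h, ih]

theorem loopA (rest : List (Int × (Int × Int))) :
    ∀ (seen : List (Int × Int)) (d : PySem.Dict (Int × Int) Int)
      (res : List (Int × (Int × (Int × Int)))),
    seen.Nodup →
    (∀ c, d.get? c = (seen.idxOf? c).map (fun i => (1 : Int) + (i : Int))) →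
    (rest.foldl
      (fun (s : PySem.Dict (Int × Int) Int × Int × List (Int × (Int × (Int × Int)))) tupla =>
        let coord := tupla.2
        if s.1.contains coord then
          (s.1, s.2.1, s.2.2 ++ [((s.1.get? coord).getD 0, tupla)])
        else
          (s.1.insert coord s.2.1, s.2.1 + 1, s.2.2 ++ [(s.2.1, tupla)]))
      (d, (seen.length : Int) + 1, res)).2.2
    = res ++ rest.map (fun t =>
        ((((seenAfter seen rest).idxOf? t.2).map (fun i => (1 : Int) + (i : Int))).getD 0, t)) := by
  induction rest with
  | nil => intro seen d res _ _; simp [seenAfter]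
  | cons t ts ih =>
    intro seen d res hnd hd
    have hcont : d.contains t.2 = decide (t.2 ∈ seen) := by
      rw [dict_contains_eq_isSome_get?, hd]
      by_cases hm : t.2 ∈ seen
      · simp [hm]
        cases h : seen.idxOf? t.2 with
        | some i => simp
        | none => exact absurd (List.idxOf?_eq_none_iff.mp h) (by simpa using hm)
      · simp [hm, List.idxOf?_eq_none_iff.mpr (by simpa using hm)]
    by_cases hm : t.2 ∈ seen
    · -- coordinate already seen: only resultado changes
      have hadd : PySem.Set.add seen t.2 = seen := by
        simp [PySem.Set.add, hm]
      have hsa : seenAfter seen (t :: ts) = seenAfter seen ts := by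
        simp [seenAfter, hadd]
      obtain ⟨u, hu⟩ := seenAfter_isPrefix ts seen
      have hidx : (seenAfter seen ts).idxOf? t.2 = seen.idxOf? t.2 := by
        rw [← hu, idxOf?_append_left _ _ _ hm]
      simp only [List.foldl_cons, hcont, hm, decide_true, if_true]
      rw [ih seen d _ hnd hd]
      simp [hsa, hidx, hd]
    · -- new coordinate
      have hadd : PySem.Set.add seen t.2 = seen ++ [t.2] := by
        simp [PySem.Set.add, hm]
      have hsa : seenAfter seen (t :: ts) = seenAfter (seen ++ [t.2]) ts := by
        simp [seenAfter, hadd]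
      have hnd' : (seen ++ [t.2]).Nodup := by
        refine List.Nodup.append hnd (List.nodup_singleton _) ?_
        intro a ha hb
        simp at hb
        exact hm (hb ▸ ha)
      have hd' : ∀ c, (d.insert t.2 ((seen.length : Int) + 1)).get? c
          = ((seen ++ [t.2]).idxOf? c).map (fun i => (1 : Int) + (i : Int)) := by
        intro c
        rw [idxOf?_append_singleton]
        by_cases hc : c = t.2
        · subst hc
          simp [PySem.Dict.get?_insert_self, hm]
          omega
        · rw [PySem.Dict.get?_insert_of_ne _ _ hc, hd]
          by_cases hcs : c ∈ seen
          · simp [hcs]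
          · simp [hcs, hc, List.idxOf?_eq_none_iff.mpr (by simpa using hcs)]
      simp only [List.foldl_cons, hcont, hm, decide_false, Bool.false_eq_true, if_false]
      have hlen : ((seen.length : Int) + 1) + 1 = ((seen ++ [t.2]).length : Int) + 1 := by
        simp [List.length_append]
      rw [hlen, ih (seen ++ [t.2]) _ _ hnd' hd', hsa]
      obtain ⟨u, hu⟩ := seenAfter_isPrefix ts (seen ++ [t.2])
      have hmem : t.2 ∈ seen ++ [t.2] := by simp
      have hidx : (seenAfter (seen ++ [t.2]) ts).idxOf? t.2 = some seen.length := by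
        rw [← hu, idxOf?_append_left _ _ _ hmem, idxOf?_append_singleton]
        simp [hm]
      simp [hidx]
      omega

-- first-occurrence index into the deduplicated list = number of distinct elements before it
theorem idxOf?_ofList_of_index? (cs : List (Int × Int)) (c : Int × Int) (k : Nat)
    (h : PySem.List.index? cs c = some k) :
    (PySem.Set.ofList cs).idxOf? c = some (PySem.Set.ofList (cs.take k)).length := by
  obtain ⟨pre, suf, hcs, hlen, hnp⟩ := (PySem.List.index?_eq_some_iff _ _ _).mp h
  subst hcs; subst hlen
  have htake : (pre ++ c :: suf).take pre.length = pre := by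
    simp
  have hofl : PySem.Set.ofList (pre ++ c :: suf)
      = (c :: suf).foldl PySem.Set.add (PySem.Set.ofList pre) := by
    simp [PySem.Set.ofList_eq_foldl, List.foldl_append]
  have hcnp : c ∉ PySem.Set.ofList pre := by
    simpa [PySem.Set.mem_ofList] using hnp
  have hadd : PySem.Set.add (PySem.Set.ofList pre) c = PySem.Set.ofList pre ++ [c] := by
    simp [PySem.Set.add, PySem.Set.contains]
    intro hmem
    exact absurd hmem hnp
  obtain ⟨u, hu⟩ := foldl_add_isPrefix suf (PySem.Set.ofList pre ++ [c])
  rw [hofl]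
  simp only [List.foldl_cons, hadd]
  rw [← hu, idxOf?_append_left _ _ _ (by simp), idxOf?_append_singleton]
  simp [hcnp, htake]

-- ===== VERDICT (by name: the statement is the Claim_ definition above) =====
theorem indexacion_spec : Claim_equal_indexacion := by
  intro tuplas _
  unfold Spec_indexacion
  have hempty : ∀ c : Int × Int, (PySem.Dict.empty : PySem.Dict (Int × Int) Int).get? c = none := by
    intro c; simp [PySem.Dict.get?, PySem.Dict.empty]
  have h := loopA tuplas [] PySem.Dict.empty []
    (by simp) (by intro c; simp [hempty, List.idxOf?])
  have hsa : seenAfter [] tuplas = PySem.Set.ofList (tuplas.map (fun t => t.2)) := by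
    simp [seenAfter, PySem.Set.ofList_eq_foldl, List.foldl_map]
  simp only [List.length_nil, Nat.cast_zero, zero_add, List.nil_append] at h
  unfold indexacion indexacion_alt
  rw [h]
  apply List.map_congr_left
  intro t ht
  have hmem : t.2 ∈ tuplas.map (fun t => t.2) := List.mem_map.mpr ⟨t, ht, rfl⟩
  obtain ⟨k, hk⟩ := Option.isSome_iff_exists.mp
    ((PySem.List.index?_isSome_iff (xs := tuplas.map (fun t => t.2)) (v := t.2)).mpr hmem)
  have hidx := idxOf?_ofList_of_index? (tuplas.map (fun t => t.2)) t.2 k hk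
  rw [hsa, hidx, hk]
  simp [PySem.List.slice_to_natCast]
  omega
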